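-- pv_equiv track=rewrite | github.com/IngenieroMacias/Lsv-Prueba | pruebalsv.py | numberofPosition
-- ===== SOURCE A (Python) =====
-- def numberofPosition(n, k, x, y, obstPosx, obstPosy):
--     d11 = min(x-1, y-1)
--     d12 = min(n-x, n-y)
--     d21 = min(n-x, y-1)
--     d22 = min(x-1, n-y)
--
--     r1 = y-1
--     r2 = n-y
--     c1 = x-1
--     c2 = n-x
--
--     for i in range(0, k):
--         if (x > obstPosx[i] and y > obstPosy[i] and x-obstPosx[i] == y-obstPosy[i]):
--             d11 = min(d11, x-obstPosx[i]-1)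
--
--         if (obstPosx[i] > x and obstPosy[i] > y and obstPosx[i]-x == obstPosy[i]-y):
--             d12 = min(d12, obstPosx[i]-x-1)
--
--         if (obstPosx[i] > x and y > obstPosy[i] and obstPosx[i]-x == y-obstPosy[i]):
--             d21 = min(d21, obstPosx[i]-x-1)
--
--         if (x > obstPosx[i] and obstPosy[i] > y and x-obstPosx[i] == obstPosy[i]-y):
--             d22 = min(d22, x-obstPosx[i]-1)
--
--         if (x == obstPosx[i] and obstPosy[i] < y):
--             r1 = min(r1, y-obstPosy[i]-1)
--
--         if (x == obstPosx[i] and obstPosy[i] > y):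
--             r2 = min(r2, obstPosy[i]-y-1)
--
--         if (y == obstPosy[i] and obstPosx[i] < x):
--             c1 = min(c1, x-obstPosx[i]-1)
--
--         if (y == obstPosy[i] and obstPosx[i] > x):
--             c2 = min(c2, obstPosx[i]-x-1)
--
--     return d11 + d12 + d21 + d22 + r1 + r2 + c1 + c2
-- ===== SOURCE B (Python) =====
-- # B: direction-major re-implementation — one generic ray routine applied to the
-- # 8 unit direction vectors, instead of A's single obstacle-major loop that
-- # threads 8 separate accumulators.
-- def numberofPosition(n, k, x, y, obstPosx, obstPosy):
--     obs = [(obstPosx[i], obstPosy[i]) for i in range(k)]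
--     total = 0
--     for dx, dy in ((-1, -1), (1, 1), (1, -1), (-1, 1),
--                    (0, -1), (0, 1), (-1, 0), (1, 0)):
--         limit = min(b for b in (n - x if dx > 0 else x - 1 if dx < 0 else None,
--                                 n - y if dy > 0 else y - 1 if dy < 0 else None)
--                     if b is not None)
--         ts = [(ox - x) * dx if dx != 0 else (oy - y) * dy
--               for ox, oy in obs if (ox - x) * dy == (oy - y) * dx]
--         total += min([limit] + [t - 1 for t in ts if t >= 1])
--     return total
-- ===== Notes on version B (the rewrite author's own statement) =====
-- stated objective: alternative
-- what changed: Replaced A's obstacle-major loop that threads 8 separate named accumulators (one per queen direction) with a direction-major decomposition: one generic ray routine, applied to the 8 unit direction vectors, that takes the min of the board limit and the forward distances of collinear obstacles.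
import Mathlib
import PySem

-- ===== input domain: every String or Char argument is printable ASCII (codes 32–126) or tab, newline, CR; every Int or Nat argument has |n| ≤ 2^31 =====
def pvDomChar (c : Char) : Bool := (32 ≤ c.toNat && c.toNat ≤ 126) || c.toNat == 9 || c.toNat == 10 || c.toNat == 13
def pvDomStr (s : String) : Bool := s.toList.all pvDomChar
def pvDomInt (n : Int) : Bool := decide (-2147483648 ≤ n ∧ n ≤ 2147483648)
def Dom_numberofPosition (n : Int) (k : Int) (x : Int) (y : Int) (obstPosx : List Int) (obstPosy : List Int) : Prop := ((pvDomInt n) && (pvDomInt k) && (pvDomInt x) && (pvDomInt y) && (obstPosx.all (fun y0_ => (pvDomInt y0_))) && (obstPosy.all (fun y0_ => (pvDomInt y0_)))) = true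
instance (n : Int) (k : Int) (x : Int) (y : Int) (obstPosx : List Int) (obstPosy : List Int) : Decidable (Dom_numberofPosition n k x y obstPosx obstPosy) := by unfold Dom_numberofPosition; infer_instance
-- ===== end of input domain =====

-- B re-implements the queen-move count direction-major: one generic ray routine applied to the
-- 8 unit direction vectors, instead of A's obstacle-major loop threading 8 accumulators (objective: alternative).

-- ===== PORT A =====
def numberofPosition (n : Int) (k : Int) (x : Int) (y : Int) (obstPosx : List Int) (obstPosy : List Int) : Int :=
  let s :=
    (PySem.List.pyRange 0 k 1).foldl
      (fun (st : Int × Int × Int × Int × Int × Int × Int × Int) i =>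
        ( (if x > PySem.List.pyGetD obstPosx i 0 ∧ y > PySem.List.pyGetD obstPosy i 0 ∧
              x - PySem.List.pyGetD obstPosx i 0 = y - PySem.List.pyGetD obstPosy i 0
           then min st.1 (x - PySem.List.pyGetD obstPosx i 0 - 1) else st.1),
          (if PySem.List.pyGetD obstPosx i 0 > x ∧ PySem.List.pyGetD obstPosy i 0 > y ∧
              PySem.List.pyGetD obstPosx i 0 - x = PySem.List.pyGetD obstPosy i 0 - y
           then min st.2.1 (PySem.List.pyGetD obstPosx i 0 - x - 1) else st.2.1),
          (if PySem.List.pyGetD obstPosx i 0 > x ∧ y > PySem.List.pyGetD obstPosy i 0 ∧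
              PySem.List.pyGetD obstPosx i 0 - x = y - PySem.List.pyGetD obstPosy i 0
           then min st.2.2.1 (PySem.List.pyGetD obstPosx i 0 - x - 1) else st.2.2.1),
          (if x > PySem.List.pyGetD obstPosx i 0 ∧ PySem.List.pyGetD obstPosy i 0 > y ∧
              x - PySem.List.pyGetD obstPosx i 0 = PySem.List.pyGetD obstPosy i 0 - y
           then min st.2.2.2.1 (x - PySem.List.pyGetD obstPosx i 0 - 1) else st.2.2.2.1),
          (if x = PySem.List.pyGetD obstPosx i 0 ∧ PySem.List.pyGetD obstPosy i 0 < y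
           then min st.2.2.2.2.1 (y - PySem.List.pyGetD obstPosy i 0 - 1) else st.2.2.2.2.1),
          (if x = PySem.List.pyGetD obstPosx i 0 ∧ PySem.List.pyGetD obstPosy i 0 > y
           then min st.2.2.2.2.2.1 (PySem.List.pyGetD obstPosy i 0 - y - 1) else st.2.2.2.2.2.1),
          (if y = PySem.List.pyGetD obstPosy i 0 ∧ PySem.List.pyGetD obstPosx i 0 < x
           then min st.2.2.2.2.2.2.1 (x - PySem.List.pyGetD obstPosx i 0 - 1) else st.2.2.2.2.2.2.1),
          (if y = PySem.List.pyGetD obstPosy i 0 ∧ PySem.List.pyGetD obstPosx i 0 > x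
           then min st.2.2.2.2.2.2.2 (PySem.List.pyGetD obstPosx i 0 - x - 1) else st.2.2.2.2.2.2.2) ))
      (min (x-1) (y-1), min (n-x) (n-y), min (n-x) (y-1), min (x-1) (n-y), y-1, n-y, x-1, n-x)
  s.1 + s.2.1 + s.2.2.1 + s.2.2.2.1 + s.2.2.2.2.1 + s.2.2.2.2.2.1 + s.2.2.2.2.2.2.1 + s.2.2.2.2.2.2.2

-- ===== PORT B =====
-- the generic ray of B: board limit from the direction's nonzero components, then the
-- collinear obstacles' forward distances; result = min of the limit and each distance - 1
def pvRayAlt (n : Int) (x : Int) (y : Int) (dx : Int) (dy : Int) (obs : List (Int × Int)) : Int :=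
  let bx : Option Int := if dx > 0 then some (n - x) else if dx < 0 then some (x - 1) else none
  let by' : Option Int := if dy > 0 then some (n - y) else if dy < 0 then some (y - 1) else none
  let limit : Int :=
    match bx, by' with
    | some a, some b => min a b
    | some a, none => a
    | none, some b => b
    | none, none => 0   -- unreachable: every queen direction has a nonzero component
  let ts := (obs.filter (fun p => (p.1 - x) * dy == (p.2 - y) * dx)).map
              (fun p => if dx ≠ 0 then (p.1 - x) * dx else (p.2 - y) * dy)
  (((ts.filter (fun t => t ≥ 1)).map (fun t => t - 1))).foldl min limit

def numberofPosition_alt (n : Int) (k : Int) (x : Int) (y : Int) (obstPosx : List Int) (obstPosy : List Int) : Int :=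
  let obs := (PySem.List.pyRange 0 k 1).map
               (fun i => (PySem.List.pyGetD obstPosx i 0, PySem.List.pyGetD obstPosy i 0))
  ([((-1 : Int), (-1 : Int)), (1, 1), (1, -1), (-1, 1), (0, -1), (0, 1), (-1, 0), (1, 0)]).foldl
    (fun tot d => tot + pvRayAlt n x y d.1 d.2 obs) 0

-- ===== PRECONDITION & SPEC =====
-- Pre_ excludes exactly the inputs where Python A raises IndexError: k exceeding an obstacle list's length.
def Pre_numberofPosition (n : Int) (k : Int) (x : Int) (y : Int) (obstPosx : List Int) (obstPosy : List Int) : Prop :=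
  k ≤ (obstPosx.length : Int) ∧ k ≤ (obstPosy.length : Int)
instance (n : Int) (k : Int) (x : Int) (y : Int) (obstPosx : List Int) (obstPosy : List Int) : Decidable (Pre_numberofPosition n k x y obstPosx obstPosy) := by unfold Pre_numberofPosition; infer_instance

def pvWitness_numberofPosition : Int × Int × Int × Int × List Int × List Int := (4, 1, 2, 3, [2], [1])

def Spec_numberofPosition (n : Int) (k : Int) (x : Int) (y : Int) (obstPosx : List Int) (obstPosy : List Int) (out : Int) : Prop := out = numberofPosition_alt n k x y obstPosx obstPosy
instance (n : Int) (k : Int) (x : Int) (y : Int) (obstPosx : List Int) (obstPosy : List Int) (out : Int) : Decidable (Spec_numberofPosition n k x y obstPosx obstPosy out) := by unfold Spec_numberofPosition; infer_instance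

-- ===== CLAIM (what is proved, stated in full; the proofs are below) =====
def Claim_equal_numberofPosition : Prop := ∀ (n : Int) (k : Int) (x : Int) (y : Int) (obstPosx : List Int) (obstPosy : List Int), Dom_numberofPosition n k x y obstPosx obstPosy → Pre_numberofPosition n k x y obstPosx obstPosy → Spec_numberofPosition n k x y obstPosx obstPosy (numberofPosition n k x y obstPosx obstPosy)

-- ===== LEMMAS AND PROOFS =====

-- B's min([limit] + [t-1 for t in ts if t >= 1]) over a filtered/mapped list
-- equals a single running-min fold over the underlying pair list.
lemma pv_ray_as_foldl (c : Int × Int → Bool) (V : Int × Int → Int) (d0 : Int)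
    (obs : List (Int × Int)) :
    ((((obs.filter c).map V).filter (fun t => t ≥ 1)).map (fun t => t - 1)).foldl min d0
      = obs.foldl (fun d p => if c p = true ∧ V p ≥ 1 then min d (V p - 1) else d) d0 := by
  induction obs generalizing d0 with
  | nil => rfl
  | cons p t ih =>
    by_cases hc : c p = true
    · by_cases hv : V p ≥ 1
      · simp [List.filter, hc, hv, List.foldl_cons, ih]
      · simp [List.filter, hc, hv, List.foldl_cons, ih]
    · simp [List.filter, hc, List.foldl_cons, ih]

lemma pv_ray_d11 (n x y : Int) (obs : List (Int × Int)) :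
    pvRayAlt n x y (-1) (-1) obs
      = obs.foldl (fun d p => if x > p.1 ∧ y > p.2 ∧ x - p.1 = y - p.2 then min d (x - p.1 - 1) else d) (min (x-1) (y-1)) := by
  unfold pvRayAlt
  norm_num
  rw [pv_ray_as_foldl]
  congr 1
  funext d p
  simp only [beq_iff_eq]
  split_ifs <;> omega

lemma pv_ray_d12 (n x y : Int) (obs : List (Int × Int)) :
    pvRayAlt n x y 1 1 obs
      = obs.foldl (fun d p => if p.1 > x ∧ p.2 > y ∧ p.1 - x = p.2 - y then min d (p.1 - x - 1) else d) (min (n-x) (n-y)) := by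
  unfold pvRayAlt
  norm_num
  rw [pv_ray_as_foldl]
  congr 1
  funext d p
  simp only [beq_iff_eq]
  split_ifs <;> omega

lemma pv_ray_d21 (n x y : Int) (obs : List (Int × Int)) :
    pvRayAlt n x y 1 (-1) obs
      = obs.foldl (fun d p => if p.1 > x ∧ y > p.2 ∧ p.1 - x = y - p.2 then min d (p.1 - x - 1) else d) (min (n-x) (y-1)) := by
  unfold pvRayAlt
  norm_num
  rw [pv_ray_as_foldl]
  congr 1
  funext d p
  simp only [beq_iff_eq]
  split_ifs <;> omega

lemma pv_ray_d22 (n x y : Int) (obs : List (Int × Int)) :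
    pvRayAlt n x y (-1) 1 obs
      = obs.foldl (fun d p => if x > p.1 ∧ p.2 > y ∧ x - p.1 = p.2 - y then min d (x - p.1 - 1) else d) (min (x-1) (n-y)) := by
  unfold pvRayAlt
  norm_num
  rw [pv_ray_as_foldl]
  congr 1
  funext d p
  simp only [beq_iff_eq]
  split_ifs <;> omega

lemma pv_ray_r1 (n x y : Int) (obs : List (Int × Int)) :
    pvRayAlt n x y 0 (-1) obs
      = obs.foldl (fun d p => if x = p.1 ∧ p.2 < y then min d (y - p.2 - 1) else d) (y-1) := by
  unfold pvRayAlt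
  norm_num
  rw [pv_ray_as_foldl]
  congr 1
  funext d p
  simp only [beq_iff_eq]
  split_ifs <;> omega

lemma pv_ray_r2 (n x y : Int) (obs : List (Int × Int)) :
    pvRayAlt n x y 0 1 obs
      = obs.foldl (fun d p => if x = p.1 ∧ p.2 > y then min d (p.2 - y - 1) else d) (n-y) := by
  unfold pvRayAlt
  norm_num
  rw [pv_ray_as_foldl]
  congr 1
  funext d p
  simp only [beq_iff_eq]
  split_ifs <;> omega

lemma pv_ray_c1 (n x y : Int) (obs : List (Int × Int)) :
    pvRayAlt n x y (-1) 0 obs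
      = obs.foldl (fun d p => if y = p.2 ∧ p.1 < x then min d (x - p.1 - 1) else d) (x-1) := by
  unfold pvRayAlt
  norm_num
  rw [pv_ray_as_foldl]
  congr 1
  funext d p
  simp only [beq_iff_eq]
  split_ifs <;> omega

lemma pv_ray_c2 (n x y : Int) (obs : List (Int × Int)) :
    pvRayAlt n x y 1 0 obs
      = obs.foldl (fun d p => if y = p.2 ∧ p.1 > x then min d (p.1 - x - 1) else d) (n-x) := by
  unfold pvRayAlt
  norm_num
  rw [pv_ray_as_foldl]
  congr 1
  funext d p
  simp only [beq_iff_eq]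
  split_ifs <;> omega

-- A's obstacle-major fold of 8 independent accumulators splits into 8 per-direction folds.
lemma pv_A_split (x y : Int) (obstPosx obstPosy : List Int) (L : List Int)
    (a1 a2 a3 a4 a5 a6 a7 a8 : Int) :
    L.foldl
      (fun (st : Int × Int × Int × Int × Int × Int × Int × Int) i =>
        ( (if x > PySem.List.pyGetD obstPosx i 0 ∧ y > PySem.List.pyGetD obstPosy i 0 ∧
              x - PySem.List.pyGetD obstPosx i 0 = y - PySem.List.pyGetD obstPosy i 0
           then min st.1 (x - PySem.List.pyGetD obstPosx i 0 - 1) else st.1),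
          (if PySem.List.pyGetD obstPosx i 0 > x ∧ PySem.List.pyGetD obstPosy i 0 > y ∧
              PySem.List.pyGetD obstPosx i 0 - x = PySem.List.pyGetD obstPosy i 0 - y
           then min st.2.1 (PySem.List.pyGetD obstPosx i 0 - x - 1) else st.2.1),
          (if PySem.List.pyGetD obstPosx i 0 > x ∧ y > PySem.List.pyGetD obstPosy i 0 ∧
              PySem.List.pyGetD obstPosx i 0 - x = y - PySem.List.pyGetD obstPosy i 0
           then min st.2.2.1 (PySem.List.pyGetD obstPosx i 0 - x - 1) else st.2.2.1),
          (if x > PySem.List.pyGetD obstPosx i 0 ∧ PySem.List.pyGetD obstPosy i 0 > y ∧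
              x - PySem.List.pyGetD obstPosx i 0 = PySem.List.pyGetD obstPosy i 0 - y
           then min st.2.2.2.1 (x - PySem.List.pyGetD obstPosx i 0 - 1) else st.2.2.2.1),
          (if x = PySem.List.pyGetD obstPosx i 0 ∧ PySem.List.pyGetD obstPosy i 0 < y
           then min st.2.2.2.2.1 (y - PySem.List.pyGetD obstPosy i 0 - 1) else st.2.2.2.2.1),
          (if x = PySem.List.pyGetD obstPosx i 0 ∧ PySem.List.pyGetD obstPosy i 0 > y
           then min st.2.2.2.2.2.1 (PySem.List.pyGetD obstPosy i 0 - y - 1) else st.2.2.2.2.2.1),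
          (if y = PySem.List.pyGetD obstPosy i 0 ∧ PySem.List.pyGetD obstPosx i 0 < x
           then min st.2.2.2.2.2.2.1 (x - PySem.List.pyGetD obstPosx i 0 - 1) else st.2.2.2.2.2.2.1),
          (if y = PySem.List.pyGetD obstPosy i 0 ∧ PySem.List.pyGetD obstPosx i 0 > x
           then min st.2.2.2.2.2.2.2 (PySem.List.pyGetD obstPosx i 0 - x - 1) else st.2.2.2.2.2.2.2) ))
      (a1, a2, a3, a4, a5, a6, a7, a8)
      = (L.foldl (fun d i => if x > PySem.List.pyGetD obstPosx i 0 ∧ y > PySem.List.pyGetD obstPosy i 0 ∧ x - PySem.List.pyGetD obstPosx i 0 = y - PySem.List.pyGetD obstPosy i 0 then min d (x - PySem.List.pyGetD obstPosx i 0 - 1) else d) a1,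
         L.foldl (fun d i => if PySem.List.pyGetD obstPosx i 0 > x ∧ PySem.List.pyGetD obstPosy i 0 > y ∧ PySem.List.pyGetD obstPosx i 0 - x = PySem.List.pyGetD obstPosy i 0 - y then min d (PySem.List.pyGetD obstPosx i 0 - x - 1) else d) a2,
         L.foldl (fun d i => if PySem.List.pyGetD obstPosx i 0 > x ∧ y > PySem.List.pyGetD obstPosy i 0 ∧ PySem.List.pyGetD obstPosx i 0 - x = y - PySem.List.pyGetD obstPosy i 0 then min d (PySem.List.pyGetD obstPosx i 0 - x - 1) else d) a3,
         L.foldl (fun d i => if x > PySem.List.pyGetD obstPosx i 0 ∧ PySem.List.pyGetD obstPosy i 0 > y ∧ x - PySem.List.pyGetD obstPosx i 0 = PySem.List.pyGetD obstPosy i 0 - y then min d (x - PySem.List.pyGetD obstPosx i 0 - 1) else d) a4,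
         L.foldl (fun d i => if x = PySem.List.pyGetD obstPosx i 0 ∧ PySem.List.pyGetD obstPosy i 0 < y then min d (y - PySem.List.pyGetD obstPosy i 0 - 1) else d) a5,
         L.foldl (fun d i => if x = PySem.List.pyGetD obstPosx i 0 ∧ PySem.List.pyGetD obstPosy i 0 > y then min d (PySem.List.pyGetD obstPosy i 0 - y - 1) else d) a6,
         L.foldl (fun d i => if y = PySem.List.pyGetD obstPosy i 0 ∧ PySem.List.pyGetD obstPosx i 0 < x then min d (x - PySem.List.pyGetD obstPosx i 0 - 1) else d) a7,
         L.foldl (fun d i => if y = PySem.List.pyGetD obstPosy i 0 ∧ PySem.List.pyGetD obstPosx i 0 > x then min d (PySem.List.pyGetD obstPosx i 0 - x - 1) else d) a8) := by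
  induction L generalizing a1 a2 a3 a4 a5 a6 a7 a8 with
  | nil => rfl
  | cons i t ih => simp only [List.foldl_cons]; exact ih _ _ _ _ _ _ _ _

-- ===== VERDICT (by name: the statement is the Claim_ definition above) =====
theorem numberofPosition_spec : Claim_equal_numberofPosition := by
  intro n k x y px py _ _
  unfold Spec_numberofPosition numberofPosition numberofPosition_alt
  simp only [List.foldl_cons, List.foldl_nil]
  rw [pv_ray_d11, pv_ray_d12, pv_ray_d21, pv_ray_d22, pv_ray_r1, pv_ray_r2, pv_ray_c1, pv_ray_c2,
      pv_A_split]
  simp only [List.foldl_map]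
  omega
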